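-- pv_equiv track=rewrite | github.com/wernad/Advent_of_Code | 2019/task3.py | draw_wire
-- ===== SOURCE A (Python) =====
-- def draw_wire(wire_steps):
--     coords = [(0, 0, 0)] #[(x,y,distance)]
--     for step in wire_steps:
--         x, y, distance = coords[-1][0], coords[-1][1], coords[-1][2]
--         if step[0] == 'L':
--             x -= step[1]
--         elif step[0] == 'R':
--             x += step[1]
--         elif step[0] == 'U':
--             y += step[1]
--         elif step[0] == 'D':
--             y -= step[1]
--         distance += step[1]
--         coords.append((x, y, distance))
--     return coords
-- ===== SOURCE B (Python) =====
-- def draw_wire(wire_steps):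
--     deltas = {'L': (-1, 0), 'R': (1, 0), 'U': (0, 1), 'D': (0, -1)}
--
--     def go(pos, rest):
--         if not rest:
--             return [pos]
--         direction, amount = rest[0]
--         x, y, distance = pos
--         dx, dy = deltas.get(direction, (0, 0))
--         return [pos] + go((x + dx * amount, y + dy * amount, distance + amount), rest[1:])
--
--     return go((0, 0, 0), wire_steps)
-- ===== Notes on version B (the rewrite author's own statement) =====
-- stated objective: alternative
-- what changed: Replaced the explicit loop that appends to a growing list (reading its last element each iteration) by a recursive scan that threads the current (x,y,distance) state and builds the output front-to-back, with the if/elif direction chain replaced by a table of unit deltas.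
import Mathlib
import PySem

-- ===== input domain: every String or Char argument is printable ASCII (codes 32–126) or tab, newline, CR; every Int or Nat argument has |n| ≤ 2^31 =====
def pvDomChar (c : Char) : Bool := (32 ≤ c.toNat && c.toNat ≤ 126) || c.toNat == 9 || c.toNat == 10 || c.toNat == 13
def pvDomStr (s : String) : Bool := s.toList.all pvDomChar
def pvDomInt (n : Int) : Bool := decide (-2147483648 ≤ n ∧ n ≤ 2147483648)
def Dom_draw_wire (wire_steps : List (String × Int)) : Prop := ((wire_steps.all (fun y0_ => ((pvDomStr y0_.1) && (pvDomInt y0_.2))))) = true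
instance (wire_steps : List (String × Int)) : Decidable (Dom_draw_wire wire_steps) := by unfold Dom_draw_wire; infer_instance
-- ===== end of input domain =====

-- B rewrites A's loop (append to a list, reread its last element) as a recursive scan
-- threading the (x,y,distance) state, with the if/elif chain replaced by a delta table.

-- ===== PORT A =====
-- the loop of A: coords is the growing list, steps the remaining wire_steps
def draw_wire_loop (coords : List (Int × Int × Int)) (steps : List (String × Int)) :
    List (Int × Int × Int) :=
  match steps with
  | [] => coords
  | step :: rest =>
    -- coords[-1]: coords starts nonempty and only grows, so pyGetD is exact here
    let last := PySem.List.pyGetD coords (-1) (0, 0, 0)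
    let x := last.1
    let y := last.2.1
    let distance := last.2.2
    let p : Int × Int :=
      if step.1 == "L" then (x - step.2, y)
      else if step.1 == "R" then (x + step.2, y)
      else if step.1 == "U" then (x, y + step.2)
      else if step.1 == "D" then (x, y - step.2)
      else (x, y)
    draw_wire_loop (coords ++ [(p.1, p.2, distance + step.2)]) rest

def draw_wire (wire_steps : List (String × Int)) : List (Int × Int × Int) :=
  draw_wire_loop [(0, 0, 0)] wire_steps

-- ===== PORT B =====
def pvDeltas : PySem.Dict String (Int × Int) :=
  PySem.Dict.ofList [("L", (-1, 0)), ("R", (1, 0)), ("U", (0, 1)), ("D", (0, -1))]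

def draw_wire_alt_go (pos : Int × Int × Int) (rest : List (String × Int)) :
    List (Int × Int × Int) :=
  match rest with
  | [] => [pos]
  | (direction, amount) :: t =>
    let x := pos.1
    let y := pos.2.1
    let distance := pos.2.2
    let d := PySem.Dict.getD pvDeltas direction (0, 0)
    [pos] ++ draw_wire_alt_go (x + d.1 * amount, y + d.2 * amount, distance + amount) t

def draw_wire_alt (wire_steps : List (String × Int)) : List (Int × Int × Int) :=
  draw_wire_alt_go (0, 0, 0) wire_steps

-- ===== PRECONDITION & SPEC =====
def Spec_draw_wire (wire_steps : List (String × Int)) (out : List (Int × Int × Int)) : Prop := out = draw_wire_alt wire_steps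
instance (wire_steps : List (String × Int)) (out : List (Int × Int × Int)) : Decidable (Spec_draw_wire wire_steps out) := by unfold Spec_draw_wire; infer_instance

-- ===== CLAIM (what is proved, stated in full; the proofs are below) =====
def Claim_equal_draw_wire : Prop := ∀ (wire_steps : List (String × Int)), Dom_draw_wire wire_steps → Spec_draw_wire wire_steps (draw_wire wire_steps)

-- ===== LEMMAS AND PROOFS =====

lemma pvDeltas_mk : pvDeltas =
    PySem.Dict.mk [("L", (-1, 0)), ("R", (1, 0)), ("U", (0, 1)), ("D", (0, -1))] := by decide

-- both step functions compute the same next tuple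
lemma step_eq (dir : String) (n x y : Int) :
    ((if dir = "L" then (x - n, y)
      else if dir = "R" then (x + n, y)
      else if dir = "U" then (x, y + n)
      else if dir = "D" then (x, y - n)
      else (x, y)) : Int × Int) =
    (x + (PySem.Dict.getD pvDeltas dir (0, 0)).1 * n,
     y + (PySem.Dict.getD pvDeltas dir (0, 0)).2 * n) := by
  by_cases hL : dir = "L"
  · subst hL
    have h : PySem.Dict.getD pvDeltas "L" ((0 : Int), (0 : Int)) = (-1, 0) := by decide
    simp [h]; ring
  · by_cases hR : dir = "R"
    · subst hR
      have h : PySem.Dict.getD pvDeltas "R" ((0 : Int), (0 : Int)) = (1, 0) := by decide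
      simp [h]
    · by_cases hU : dir = "U"
      · subst hU
        have h : PySem.Dict.getD pvDeltas "U" ((0 : Int), (0 : Int)) = (0, 1) := by decide
        simp [h]
      · by_cases hD : dir = "D"
        · subst hD
          have h : PySem.Dict.getD pvDeltas "D" ((0 : Int), (0 : Int)) = (0, -1) := by decide
          simp [h]; ring
        · have h : PySem.Dict.getD pvDeltas dir ((0 : Int), (0 : Int)) = (0, 0) := by
            simp [pvDeltas_mk, PySem.Dict.getD, PySem.Dict.get?,
              Ne.symm hL, Ne.symm hR, Ne.symm hU, Ne.symm hD]
          simp [h, hL, hR, hU, hD]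

-- A's loop on coords = pre ++ [pos] equals pre ++ B's scan from pos
lemma loop_eq_go (steps : List (String × Int)) :
    ∀ (pre : List (Int × Int × Int)) (pos : Int × Int × Int),
    draw_wire_loop (pre ++ [pos]) steps = pre ++ draw_wire_alt_go pos steps := by
  induction steps with
  | nil => intro pre pos; simp [draw_wire_loop, draw_wire_alt_go]
  | cons step rest ih =>
    intro pre pos
    obtain ⟨dir, n⟩ := step
    simp only [draw_wire_loop, draw_wire_alt_go,
      PySem.List.pyGetD_neg_one_append_singleton]
    rw [← List.append_assoc, ih (pre ++ [pos])]
    simp only [beq_iff_eq, List.append_assoc, List.singleton_append]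
    rw [step_eq dir n pos.1 pos.2.1]

-- ===== VERDICT (by name: the statement is the Claim_ definition above) =====
theorem draw_wire_spec : Claim_equal_draw_wire := by
  intro ws _
  show draw_wire ws = draw_wire_alt ws
  have := loop_eq_go ws [] (0, 0, 0)
  simpa [draw_wire, draw_wire_alt] using this
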